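-- pv_equiv track=rewrite | github.com/Aquid0/advent-of-code-2024 | day-09/puzzle1.py | check
-- ===== SOURCE A (Python) =====
-- def check(diskmap):
--     found_dot = False
--     for i in range(len(diskmap)-1):
--         if diskmap[i] == ".":
--             found_dot = True
--
--         if found_dot and diskmap[i] != ".":
--                 return False
--     return True
-- ===== SOURCE B (Python) =====
-- def check(diskmap):
--     prefix = diskmap[:-1]
--     while prefix and prefix[-1] == ".":
--         prefix = prefix[:-1]
--     return "." not in prefix
-- ===== Notes on version B (the rewrite author's own statement) =====
-- stated objective: idiomatic
-- what changed: Replaces the forward flag-carrying index scan with stripping the trailing dots off diskmap[:-1] from the back and then a single membership test for a remaining dot.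
import Mathlib
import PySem

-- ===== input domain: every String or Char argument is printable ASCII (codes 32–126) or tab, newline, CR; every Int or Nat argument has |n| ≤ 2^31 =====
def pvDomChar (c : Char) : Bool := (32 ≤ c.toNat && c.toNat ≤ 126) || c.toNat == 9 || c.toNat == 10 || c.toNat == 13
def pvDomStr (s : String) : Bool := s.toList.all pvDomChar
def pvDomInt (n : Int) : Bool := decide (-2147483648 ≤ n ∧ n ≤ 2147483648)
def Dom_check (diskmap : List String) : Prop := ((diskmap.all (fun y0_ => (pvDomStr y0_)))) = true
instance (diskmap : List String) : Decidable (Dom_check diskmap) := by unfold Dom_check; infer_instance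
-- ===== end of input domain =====

-- B strips the trailing dots off diskmap[:-1] from the back and tests for a remaining dot;
-- A's forward flag-carrying index scan is replaced (same O(n) cost, plainer structure).

-- ===== PORT A =====
-- for i in range(len(diskmap)-1): flag scan with early return False
def checkGo (diskmap : List String) (n i : Nat) (found : Bool) : Bool :=
  if _h : i < n then
    let found' := if diskmap.getD i "" = "." then true else found
    if found' ∧ diskmap.getD i "" ≠ "." then false
    else checkGo diskmap n (i + 1) found'
  else true
termination_by n - i

def check (diskmap : List String) : Bool :=
  checkGo diskmap (diskmap.length - 1) 0 false

-- ===== PORT B =====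
-- while prefix and prefix[-1] == ".": prefix = prefix[:-1]
def stripT (pre : List String) : List String :=
  if pre ≠ [] ∧ pre.getLast?.getD "" = "." then stripT pre.dropLast else pre
termination_by pre.length
decreasing_by
  rename_i h
  cases pre with
  | nil => exact absurd rfl h.1
  | cons a l => simp

def check_alt (diskmap : List String) : Bool :=
  let pre := diskmap.dropLast
  !((stripT pre).contains ".")

-- ===== PRECONDITION & SPEC =====
def Spec_check (diskmap : List String) (out : Bool) : Prop := out = check_alt diskmap
instance (diskmap : List String) (out : Bool) : Decidable (Spec_check diskmap out) := by unfold Spec_check; infer_instance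

-- ===== CLAIM (what is proved, stated in full; the proofs are below) =====
def Claim_equal_check : Prop := ∀ (diskmap : List String), Dom_check diskmap → Spec_check diskmap (check diskmap)

-- ===== LEMMAS AND PROOFS =====

-- proof-side restatement of A's scan as structural recursion on the scanned list
def goodF : List String → Bool → Bool
  | [], _ => true
  | x :: xs, f =>
    if x = "." then goodF xs true
    else if f then false else goodF xs false

theorem checkGo_eq_goodF (d : List String) (n : Nat) (hn : n ≤ d.length) :
    ∀ i f, i ≤ n → checkGo d n i f = goodF ((d.drop i).take (n - i)) f := by
  intro i
  induction hk : n - i generalizing i with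
  | zero =>
    intro f hi
    have : ¬ i < n := by omega
    rw [checkGo]
    simp [this, goodF]
  | succ k ih =>
    intro f hi
    have hlt : i < n := by omega
    have hil : i < d.length := by omega
    have hrec : n - (i + 1) = k := by omega
    have hdrop : d.drop i = d[i] :: d.drop (i + 1) := List.drop_eq_getElem_cons hil
    have hgd : d[i]?.getD "" = d[i] := by simp [List.getElem?_eq_getElem hil]
    rw [checkGo, hdrop, List.take_succ_cons]
    by_cases hx : d[i] = "."
    · simp [hlt, goodF, hgd, hx, ih (i + 1) hrec true (by omega)]
    · cases f with
      | false => simp [hlt, goodF, hgd, hx, ih (i + 1) hrec false (by omega)]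
      | true => simp [hlt, goodF, hgd, hx]

theorem check_eq_goodF (d : List String) : check d = goodF d.dropLast false := by
  have := checkGo_eq_goodF d (d.length - 1) (by omega) 0 false (by omega)
  rw [check, this]
  simp [List.dropLast_eq_take]

-- stripT on a snoc: one unfolding of the while loop
theorem stripT_nil : stripT [] = [] := by rw [stripT]; simp

theorem stripT_snoc (ys : List String) (a : String) :
    stripT (ys ++ [a]) = if a = "." then stripT ys else ys ++ [a] := by
  rw [stripT]
  by_cases ha : a = "."
  · simp [ha]
  · simp [ha]

-- stripT on a cons
theorem stripT_cons (x : String) (xs : List String) :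
    stripT (x :: xs) =
      if stripT xs = [] then (if x = "." then [] else [x]) else x :: stripT xs := by
  induction xs using List.reverseRecOn with
  | nil =>
    rw [show x :: ([] : List String) = [] ++ [x] from rfl, stripT_snoc, stripT_nil]
    by_cases hx : x = "." <;> simp [hx]
  | append_singleton ys a ih =>
    rw [show x :: (ys ++ [a]) = (x :: ys) ++ [a] from rfl, stripT_snoc, stripT_snoc]
    by_cases ha : a = "."
    · simpa [ha] using ih
    · simp [ha]

theorem stripT_eq_nil_iff (l : List String) :
    stripT l = [] ↔ l.all (fun s => s == ".") = true := by
  induction l with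
  | nil => simp [stripT_nil]
  | cons x xs ih =>
    rw [stripT_cons]
    by_cases hnil : stripT xs = []
    · by_cases hx : x = "." <;> simp [hnil, hx, ih.1 hnil]
    · have hfa : xs.all (fun s => s == ".") = false :=
        Bool.eq_false_iff.mpr (fun h => hnil (ih.mpr h))
      simp [hnil, hfa]

theorem goodF_true_eq_all (l : List String) :
    goodF l true = l.all (fun s => s == ".") := by
  induction l with
  | nil => rfl
  | cons x xs ih =>
    by_cases hx : x = "." <;> simp [goodF, hx, ih]

theorem goodF_false_of_all (l : List String)
    (h : l.all (fun s => s == ".") = true) : goodF l false = true := by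
  induction l with
  | nil => rfl
  | cons x xs ih =>
    simp only [List.all_cons, Bool.and_eq_true, beq_iff_eq] at h
    simp [goodF, h.1, goodF_true_eq_all, h.2]

theorem goodF_false_eq_strip (l : List String) :
    goodF l false = !((stripT l).contains ".") := by
  induction l with
  | nil => simp [goodF, stripT_nil]
  | cons x xs ih =>
    rw [stripT_cons]
    by_cases hnil : stripT xs = []
    · have hall := (stripT_eq_nil_iff xs).1 hnil
      by_cases hx : x = "."
      · simp [goodF, hx, hnil, goodF_true_eq_all, hall]
      · have hxx : ¬ "." = x := fun h => hx h.symm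
        simp [goodF, hx, hnil, goodF_false_of_all xs hall, hxx]
    · by_cases hx : x = "."
      · -- a non-dot survives in stripT xs, so a dot precedes a non-dot: both sides false
        have hne : ¬ xs.all (fun s => s == ".") = true :=
          fun hall => hnil ((stripT_eq_nil_iff xs).2 hall)
        have hfalse : xs.all (fun s => s == ".") = false := Bool.eq_false_iff.mpr hne
        have hcont : ((x :: stripT xs).contains ".") = true := by simp [hx]
        simp [goodF, hx, hnil, goodF_true_eq_all, hfalse]
      · have hxx : ¬ "." = x := fun h => hx h.symm
        simp [goodF, hx, hnil, ih, hxx]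

-- ===== VERDICT (by name: the statement is the Claim_ definition above) =====
theorem check_spec : Claim_equal_check := by
  intro d _
  show check d = check_alt d
  rw [check_eq_goodF, check_alt, goodF_false_eq_strip]
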